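-- pv_equiv track=rewrite | github.com/NLP-Suite/NLP-Suite | src/NGrams_CoOccurrences_util.py | process_date
-- ===== SOURCE A (Python) =====
-- def processSearchWords(inputStr):
--     word_list = []
--     if inputStr.find("\"") == -1:
--         # no quotation mark
--         word_list += inputStr.split(",")
--     else:
--         # contains quotation mark
--         curWord = ""
--         i = 0
--         while i < len(inputStr):
--             if inputStr[i] == ",":
--                 if curWord != "":
--                     word_list.append(curWord)
--                 curWord = ""
--             elif inputStr[i] == "\"":
--                 endIndex = inputStr.index("\"", i + 1)
--                 word_list.append(inputStr[i + 1: endIndex])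
--                 i = endIndex
--             else:
--                 curWord = curWord + inputStr[i]
--             i += 1
--     return word_list
--
-- def process_date(search_wordsLists, temporal_aggregation):
--     # it will iterate through i = 0, 1, 2, …., n-1
--     # this assumes the data are in this format: temporal_aggregation, frequency of search-word_1, frequency of search-word_2, ...
--     i = 0
--     j = 0
--     columns_to_be_plotted_yAxis = []
--     ngram_list = processSearchWords(search_wordsLists)
--     ngram_list = ['-checkNGrams'] + ngram_list
--     while i < (len(ngram_list) - 1):
--         if temporal_aggregation == "quarter" or temporal_aggregation == "month":
--             if i == 0:
--                 j = j + 3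
--             columns_to_be_plotted_yAxis.append([0, j])
--         else:
--             columns_to_be_plotted_yAxis.append([0, i + 1])
--         i += 1
--         j += 1
--     return columns_to_be_plotted_yAxis
-- ===== SOURCE B (Python) =====
-- def process_date(search_wordsLists, temporal_aggregation):
--     # count the words directly with a two-flag state machine; never build the word list
--     s = search_wordsLists
--     if '"' not in s:
--         n = s.count(',') + 1
--     else:
--         n, in_q, pending = 0, False, False
--         for c in s:
--             if in_q:
--                 if c == '"':
--                     in_q, n = False, n + 1
--             elif c == '"':
--                 in_q = True
--             elif c == ',':
--                 if pending:
--                     n += 1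
--                 pending = False
--             else:
--                 pending = True
--     offset = 3 if temporal_aggregation in ("quarter", "month") else 1
--     return [[0, k + offset] for k in range(n)]
-- ===== Notes on version B (the rewrite author's own statement) =====
-- stated objective: alternative
-- what changed: A parses the string into a word list (index-jumping scanner with substring extraction) and then runs a counter loop over that list; B never builds any word list: it counts the words with a single two-flag (in-quote, pending) state machine fold over the characters (or commas+1 when no quote is present) and emits the closed-form table [[0, k + offset]].
import Mathlib
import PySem

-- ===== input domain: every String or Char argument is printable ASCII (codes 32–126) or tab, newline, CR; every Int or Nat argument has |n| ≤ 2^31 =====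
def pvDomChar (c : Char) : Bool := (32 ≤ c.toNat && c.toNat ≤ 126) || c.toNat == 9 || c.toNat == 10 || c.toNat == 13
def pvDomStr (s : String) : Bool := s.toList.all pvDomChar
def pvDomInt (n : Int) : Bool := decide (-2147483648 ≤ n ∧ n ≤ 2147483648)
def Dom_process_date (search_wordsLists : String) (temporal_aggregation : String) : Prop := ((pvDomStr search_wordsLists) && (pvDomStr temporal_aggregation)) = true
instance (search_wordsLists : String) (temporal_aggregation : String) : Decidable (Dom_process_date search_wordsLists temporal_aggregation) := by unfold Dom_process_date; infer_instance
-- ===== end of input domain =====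

-- B never builds the word list: it counts A's words with a two-flag state machine
-- (inside-quote, pending-word) and emits the closed-form table [[0, k + offset]].

-- ===== PORT A =====
-- transliteration of processSearchWords' quoted-mode while loop; `none` is the
-- ValueError of inputStr.index('"', i + 1) (unmatched quote; excluded by Pre_).
-- The loop advances i by at least 1 per iteration, so fuel = len(inputStr) + 1 suffices;
-- the fuel-0 branch returns none, which Pre_ keeps unreachable.
def pswLoop (s : List Char) (i : Nat) (cur : List Char) (acc : List String) (fuel : Nat) :
    Option (List String) :=
  match fuel with
  | 0 => none
  | fuel + 1 =>
    if h : i < s.length then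
      if s[i] = ',' then
        pswLoop s (i + 1) [] (if cur ≠ [] then acc ++ [String.ofList cur] else acc) fuel
      else if s[i] = '"' then
        -- endIndex = inputStr.index('"', i+1): ValueError (none) when findFrom returns -1
        let e := PySem.Chars.findFrom s ['"'] ((i : Int) + 1) none
        if e = -1 then none
        else
          -- word_list.append(inputStr[i+1:endIndex]); i = endIndex (curWord is NOT reset)
          pswLoop s (e.toNat + 1) cur
            (acc ++ [String.ofList (PySem.List.slice s (some ((i : Int) + 1)) (some e))]) fuel
      else pswLoop s (i + 1) (cur ++ [s[i]]) acc fuel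
    else some acc

def processSearchWords (inputStr : String) : Option (List String) :=
  if PySem.Str.find inputStr "\"" = -1 then
    -- sep "," ≠ "", so split? is always some here
    some ((PySem.Str.split? inputStr ",").getD [])
  else
    pswLoop inputStr.toList 0 [] [] (inputStr.toList.length + 1)

-- the while loop of process_date, state (i, j, accumulator), bound n = len(ngram_list) - 1
def pdLoop (temporal_aggregation : String) (n i : Nat) (j : Int) (acc : List (List Int)) :
    List (List Int) :=
  if _h : i < n then
    if temporal_aggregation = "quarter" ∨ temporal_aggregation = "month" then
      let j' := if i = 0 then j + 3 else j
      pdLoop temporal_aggregation n (i + 1) (j' + 1) (acc ++ [[0, j']])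
    else
      pdLoop temporal_aggregation n (i + 1) (j + 1) (acc ++ [[0, (i : Int) + 1]])
  else acc
termination_by n - i

def process_date (search_wordsLists : String) (temporal_aggregation : String) : List (List Int) :=
  match processSearchWords search_wordsLists with
  | none => []  -- A raises ValueError here; excluded by Pre_process_date
  | some wl =>
    let ngram_list := "-checkNGrams" :: wl
    pdLoop temporal_aggregation (ngram_list.length - 1) 0 0 []

-- ===== PORT B =====
-- state (n, in_quote, pending): one fold over the characters, counting words only
def pdStep : Nat × Bool × Bool → Char → Nat × Bool × Bool
  | (n, inq, pending), c =>
    if inq then (if c = '"' then (n + 1, false, pending) else (n, inq, pending))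
    else if c = '"' then (n, true, pending)
    else if c = ',' then ((if pending then n + 1 else n), inq, false)
    else (n, inq, true)

def process_date_alt (search_wordsLists : String) (temporal_aggregation : String) : List (List Int) :=
  let n : Nat :=
    if PySem.Str.isIn "\"" search_wordsLists = false then
      PySem.Str.count search_wordsLists "," + 1
    else
      (search_wordsLists.toList.foldl pdStep (0, false, false)).1
  let offset : Int := if temporal_aggregation = "quarter" ∨ temporal_aggregation = "month" then 3 else 1
  (List.range n).map (fun k => [0, (k : Int) + offset])

-- ===== PRECONDITION & SPEC =====
-- Pre_ excludes exactly the inputs where A raises ValueError: an odd number of '"'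
-- characters leaves some inputStr.index('"', i+1) without a closing quote.
def Pre_process_date (search_wordsLists : String) (_temporal_aggregation : String) : Prop :=
  search_wordsLists.toList.count '"' % 2 = 0
instance (search_wordsLists : String) (temporal_aggregation : String) : Decidable (Pre_process_date search_wordsLists temporal_aggregation) := by unfold Pre_process_date; infer_instance
def pvWitness_process_date : String × String := ("\"a b\",c", "month")

def Spec_process_date (search_wordsLists : String) (temporal_aggregation : String) (out : List (List Int)) : Prop := out = process_date_alt search_wordsLists temporal_aggregation
instance (search_wordsLists : String) (temporal_aggregation : String) (out : List (List Int)) : Decidable (Spec_process_date search_wordsLists temporal_aggregation out) := by unfold Spec_process_date; infer_instance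

-- ===== CLAIM (what is proved, stated in full; the proofs are below) =====
def Claim_equal_process_date : Prop := ∀ (search_wordsLists : String) (temporal_aggregation : String), Dom_process_date search_wordsLists temporal_aggregation → Pre_process_date search_wordsLists temporal_aggregation → Spec_process_date search_wordsLists temporal_aggregation (process_date search_wordsLists temporal_aggregation)
-- ===== LEMMAS AND PROOFS =====

-- the word count accumulated by pdStep is additive in the starting count
theorem foldl_pdStep_shift (r : List Char) :
    ∀ (n : Nat) (inq p : Bool),
      r.foldl pdStep (n, inq, p)
        = ((r.foldl pdStep (0, inq, p)).1 + n, (r.foldl pdStep (0, inq, p)).2) := by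
  induction r with
  | nil => intro n inq p; simp
  | cons c r ih =>
    intro n inq p
    have hstep : pdStep (n, inq, p) c
        = ((pdStep (0, inq, p) c).1 + n, (pdStep (0, inq, p) c).2) := by
      simp only [pdStep]
      split_ifs <;> simp [Nat.add_comm]
    rcases h0 : pdStep (0, inq, p) c with ⟨m, inq', p'⟩
    rw [List.foldl_cons, List.foldl_cons, hstep, h0]
    simp only
    rw [ih (m + n) inq' p', ih m inq' p']
    simp [Nat.add_assoc]

-- in the in-quote state the machine skips quote-free characters and counts 1 at the
-- closing quote
theorem foldl_pdStep_inq (q : List Char) (hq : ∀ c ∈ q, c ≠ '"') :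
    ∀ (rest : List Char) (n : Nat) (p : Bool),
      (q ++ '"' :: rest).foldl pdStep (n, true, p) = rest.foldl pdStep (n + 1, false, p) := by
  induction q with
  | nil => intro rest n p; simp [pdStep]
  | cons c q ih =>
    intro rest n p
    have hc : c ≠ '"' := hq c (by simp)
    simp only [List.cons_append, List.foldl_cons, pdStep, if_neg hc]
    exact ih (fun c hc => hq c (by simp [hc])) rest n p

-- length of splitOn by a single comma = number of commas + 1
theorem splitOn_go_length :
    ∀ (fuel : Nat) (l cur : List Char) (acc : List (List Char)), l.length < fuel →
      (PySem.Chars.splitOn.go [','] fuel l cur acc).length = acc.length + 1 + l.count ',' := by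
  intro fuel
  induction fuel with
  | zero => intro l cur acc h; omega
  | succ fuel ih =>
    intro l cur acc h
    cases l with
    | nil => rw [PySem.Chars.splitOn.go.eq_def]; simp
    | cons c rest =>
      rw [PySem.Chars.splitOn.go.eq_def]
      by_cases hc : c = ','
      · subst hc
        have hrec := ih rest [] (cur.reverse :: acc)
          (by simp only [List.length_cons] at h; omega)
        simp [List.isPrefixOf, hrec]
        omega
      · have hbeq : ((',' : Char) == c) = false := by
          simp; exact fun h' => hc h'.symm
        have hrec := ih rest (c :: cur) acc (by simp only [List.length_cons] at h; omega)
        simp [List.isPrefixOf, hbeq, hrec, hc]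

-- PySem.Chars.count by a single comma = List.count
theorem count_go_comma :
    ∀ (fuel : Nat) (l : List Char) (acc : Nat), l.length ≤ fuel →
      PySem.Chars.count.go [','] fuel l acc = acc + l.count ',' := by
  intro fuel
  induction fuel with
  | zero =>
    intro l acc h
    have : l = [] := List.length_eq_zero_iff.mp (by omega)
    subst this
    rw [PySem.Chars.count.go.eq_def]; simp
  | succ fuel ih =>
    intro l acc h
    cases l with
    | nil => rw [PySem.Chars.count.go.eq_def]; simp
    | cons c rest =>
      rw [PySem.Chars.count.go.eq_def]
      by_cases hc : c = ','
      · subst hc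
        have hrec := ih rest (acc + 1) (by simp only [List.length_cons] at h; omega)
        simp [List.isPrefixOf, hrec]
        omega
      · have hbeq : ((',' : Char) == c) = false := by
          simp; exact fun h' => hc h'.symm
        have hrec := ih rest acc (by simp only [List.length_cons] at h; omega)
        simp [List.isPrefixOf, hbeq, hrec, hc]

-- a singleton is a prefix of a cons iff it is the head
theorem quote_prefix_cons (c : Char) (l : List Char) : ['"'] <+: c :: l ↔ c = '"' := by
  constructor
  · intro h
    exact (List.cons_prefix_cons.mp h).1.symm
  · intro h; subst h; exact ⟨l, rfl⟩

-- main invariant: on a suffix with evenly many '"', pswLoop returns `acc ++ wl` where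
-- wl has exactly the length that B's state machine computes on that suffix
theorem pswLoop_spec (s : List Char) :
    ∀ (fuel i : Nat) (cur : List Char) (acc : List String),
      i ≤ s.length → s.length - i < fuel → (s.drop i).count '"' % 2 = 0 →
      ∃ wl : List String, pswLoop s i cur acc fuel = some (acc ++ wl) ∧
        wl.length = ((s.drop i).foldl pdStep (0, false, !cur.isEmpty)).1 := by
  intro fuel
  induction fuel with
  | zero => intro i cur acc hi hf hp; omega
  | succ fuel ih =>
    intro i cur acc hi hf hp
    by_cases h : i < s.length
    · have hdrop : s.drop i = s[i] :: s.drop (i + 1) := List.drop_eq_getElem_cons h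
      by_cases hc : s[i] = ','
      · -- comma: flush cur if nonempty
        have hp' : (s.drop (i + 1)).count '"' % 2 = 0 := by
          rw [hdrop, List.count_cons] at hp
          simpa [hc] using hp
        obtain ⟨wl', heq, hlen⟩ := ih (i + 1) []
          (if cur ≠ [] then acc ++ [String.ofList cur] else acc) (by omega) (by omega) hp'
        refine ⟨(if cur ≠ [] then [String.ofList cur] else []) ++ wl', ?_, ?_⟩
        · rw [pswLoop, dif_pos h, if_pos hc, heq]
          by_cases hcur : cur = [] <;> simp [hcur]
        · rw [hdrop, List.foldl_cons, hc]
          have hstep : pdStep (0, false, !cur.isEmpty) ','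
              = ((if !cur.isEmpty then 1 else 0), false, false) := by
            simp [pdStep]
          rw [hstep, foldl_pdStep_shift]
          simp only [List.isEmpty_nil, Bool.not_true] at hlen
          by_cases hcur : cur = []
          · subst hcur; simp [hlen]
          · have hie : cur.isEmpty = false := by
              cases cur with
              | nil => exact absurd rfl hcur
              | cons a l => rfl
            simp [hcur, hie, hlen, Nat.add_comm]
      · by_cases hq : s[i] = '"'
        · -- quote: find the closing quote and jump past it
          have hcount1 : (s.drop i).count '"' = (s.drop (i + 1)).count '"' + 1 := by
            rw [hdrop, List.count_cons]; simp [hq]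
          have hodd : (s.drop (i + 1)).count '"' % 2 = 1 := by omega
          have hmem : '"' ∈ s.drop (i + 1) := by
            by_contra hnm
            rw [List.count_eq_zero_of_not_mem hnm] at hodd
            omega
          have hinf : ['"'] <:+: s.drop (i + 1) := by
            obtain ⟨l1, l2, hl⟩ := List.append_of_mem hmem
            exact ⟨l1, l2, by rw [hl]; simp⟩
          have hcast : ((i : Int) + 1) = ((i + 1 : Nat) : Int) := by push_cast; ring
          have hne : PySem.Chars.findFrom s ['"'] ((i : Int) + 1) none ≠ -1 := by
            rw [hcast]
            intro hcontra
            exact ((PySem.Chars.findFrom_natCast_eq_neg_one_iff s ['"'] (i + 1)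
              (by omega)).mp hcontra) hinf
          have hspec := PySem.Chars.findFrom_natCast_spec s ['"'] (i + 1) (by omega)
            (by rw [← hcast]; exact hne)
          rw [← hcast] at hspec
          obtain ⟨hge, hpre2, hmin⟩ := hspec
          obtain ⟨eN, heN⟩ : ∃ eN : Nat,
              PySem.Chars.findFrom s ['"'] ((i : Int) + 1) none = (eN : Int) :=
            ⟨(PySem.Chars.findFrom s ['"'] ((i : Int) + 1) none).toNat,
              (Int.toNat_of_nonneg (by omega)).symm⟩
          rw [heN] at hge hpre2 hmin
          simp only [Int.toNat_natCast] at hpre2 hmin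
          have hgeN : i + 1 ≤ eN := by exact_mod_cast hge
          obtain ⟨tl, htl⟩ := hpre2
          have heLt : eN < s.length := by
            have h3 : 0 < (s.drop eN).length := by rw [← htl]; simp
            simp only [List.length_drop] at h3
            omega
          have hgetE : s.drop eN = s[eN] :: s.drop (eN + 1) := List.drop_eq_getElem_cons heLt
          have h5 : '"' :: tl = s[eN] :: s.drop (eN + 1) := by
            rw [← hgetE, ← htl]; rfl
          have hdropE : s.drop eN = '"' :: s.drop (eN + 1) := by
            have h6 : '"' = s[eN] := by injection h5
            rw [hgetE, ← h6]
          have hsplit : s.drop (i + 1)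
              = (s.drop (i + 1)).take (eN - (i + 1)) ++ '"' :: s.drop (eN + 1) := by
            conv_lhs => rw [← List.take_append_drop (eN - (i + 1)) (s.drop (i + 1))]
            rw [List.drop_drop, show i + 1 + (eN - (i + 1)) = eN by omega, hdropE]
          have hqfree : ∀ c ∈ (s.drop (i + 1)).take (eN - (i + 1)), c ≠ '"' := by
            intro c hcmem hc'
            subst hc'
            obtain ⟨m, hm, hcm⟩ := List.mem_take_iff_getElem.mp hcmem
            have hmlt : m < eN - (i + 1) := lt_of_lt_of_le hm (min_le_left _ _)
            have hmlt2 : m < (s.drop (i + 1)).length := lt_of_lt_of_le hm (min_le_right _ _)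
            have hlt : i + 1 + m < s.length := by
              simp only [List.length_drop] at hmlt2
              omega
            have hnc := hmin (i + 1 + m) (by omega) (by omega)
            rw [List.drop_eq_getElem_cons hlt, quote_prefix_cons] at hnc
            apply hnc
            rw [← hcm, List.getElem_drop]
          have hp' : (s.drop (eN + 1)).count '"' % 2 = 0 := by
            have hcnteq : (s.drop (i + 1)).count '"'
                = ((s.drop (i + 1)).take (eN - (i + 1))).count '"'
                  + (1 + (s.drop (eN + 1)).count '"') := by
              conv_lhs => rw [hsplit]
              rw [List.count_append, List.count_cons]
              simp [Nat.add_comm]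
            rw [List.count_eq_zero_of_not_mem (fun hm => hqfree '"' hm rfl)] at hcnteq
            omega
          obtain ⟨wl', heq, hlen⟩ := ih (eN + 1) cur
            (acc ++ [String.ofList (PySem.List.slice s (some ((i : Int) + 1)) (some (eN : Int)))])
            (by omega) (by omega) hp'
          refine ⟨String.ofList (PySem.List.slice s (some ((i : Int) + 1)) (some (eN : Int)))
              :: wl', ?_, ?_⟩
          · rw [pswLoop, dif_pos h, if_neg hc, if_pos hq]
            simp only [heN, Int.toNat_natCast]
            rw [if_neg (by omega : ¬ ((eN : Int) = -1)), heq]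
            simp
          · rw [hdrop, List.foldl_cons, hq]
            have hstep : pdStep (0, false, !cur.isEmpty) '"' = (0, true, !cur.isEmpty) := by
              simp [pdStep]
            rw [hstep, hsplit, foldl_pdStep_inq _ hqfree, foldl_pdStep_shift]
            simp [hlen]
        · -- ordinary character: cur grows, machine sets pending
          have hp' : (s.drop (i + 1)).count '"' % 2 = 0 := by
            rw [hdrop, List.count_cons] at hp
            simpa [hq] using hp
          obtain ⟨wl', heq, hlen⟩ := ih (i + 1) (cur ++ [s[i]]) acc (by omega) (by omega) hp'
          refine ⟨wl', ?_, ?_⟩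
          · rw [pswLoop, dif_pos h, if_neg hc, if_neg hq, heq]
          · rw [hdrop, List.foldl_cons]
            have hstep : pdStep (0, false, !cur.isEmpty) s[i] = (0, false, true) := by
              simp [pdStep, hc, hq]
            rw [hstep, hlen]
            have hie : (cur ++ [s[i]]).isEmpty = false := by cases cur <;> rfl
            rw [hie]
            rfl
    · -- i = s.length: loop ends, nothing more is appended
      have hi' : i = s.length := by omega
      refine ⟨[], ?_, ?_⟩
      · rw [pswLoop, dif_neg h]; simp
      · simp [hi']

-- non-quarter/month: the A loop appends [0, i+1] for i = i0 .. n-1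
theorem pdLoop_not_qm (t : String) (ht : ¬ (t = "quarter" ∨ t = "month")) (n : Nat) :
    ∀ (k i : Nat) (j : Int) (acc : List (List Int)), n - i = k →
      pdLoop t n i j acc = acc ++ (List.range' i (n - i)).map (fun a => [0, (a : Int) + 1]) := by
  intro k
  induction k with
  | zero =>
    intro i j acc hk
    rw [pdLoop, hk]
    simp [show ¬ i < n by omega]
  | succ m ih =>
    intro i j acc hk
    have hi : i < n := by omega
    rw [pdLoop, dif_pos hi, if_neg ht, ih (i + 1) (j + 1) _ (by omega)]
    have : n - i = m + 1 := hk
    rw [this, List.range'_succ]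
    simp [show n - (i + 1) = m by omega]

-- quarter/month, past the first iteration (i ≥ 1, j = i + 3): appends [0, i+3] onwards
theorem pdLoop_qm (t : String) (ht : t = "quarter" ∨ t = "month") (n : Nat) :
    ∀ (k i : Nat) (acc : List (List Int)), n - i = k → 0 < i →
      pdLoop t n i ((i : Int) + 3) acc
        = acc ++ (List.range' i (n - i)).map (fun a => [0, (a : Int) + 3]) := by
  intro k
  induction k with
  | zero =>
    intro i acc hk _
    rw [pdLoop, hk]
    simp [show ¬ i < n by omega]
  | succ m ih =>
    intro i acc hk hi0
    have hi : i < n := by omega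
    rw [pdLoop, dif_pos hi, if_pos ht, if_neg (by omega : ¬ i = 0)]
    show pdLoop t n (i + 1) ((i : Int) + 3 + 1) (acc ++ [[0, (i : Int) + 3]]) = _
    have h1 : (i : Int) + 3 + 1 = ((i + 1 : Nat) : Int) + 3 := by push_cast; ring
    rw [h1, ih (i + 1) _ (by omega) (by omega)]
    have : n - i = m + 1 := hk
    rw [this, List.range'_succ]
    simp [show n - (i + 1) = m by omega]

-- A's whole loop equals B's closed form over the same count
theorem pdLoop_closed (t : String) (n : Nat) :
    pdLoop t n 0 0 []
      = (List.range n).map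
          (fun i => [0, (i : Int) + (if t = "quarter" ∨ t = "month" then 3 else 1)]) := by
  by_cases ht : t = "quarter" ∨ t = "month"
  · rw [if_pos ht]
    cases n with
    | zero => rw [pdLoop]; simp
    | succ m =>
      rw [pdLoop, dif_pos (by omega : 0 < m + 1), if_pos ht, if_pos rfl]
      show pdLoop t (m + 1) 1 ((0 : Int) + 3 + 1) ([] ++ [[0, (0 : Int) + 3]]) = _
      have h1 : (0 : Int) + 3 + 1 = ((1 : Nat) : Int) + 3 := by norm_num
      rw [h1, pdLoop_qm t ht (m + 1) m 1 _ (by omega) (by omega)]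
      rw [List.range_eq_range', List.range'_succ]
      simp [show m + 1 - 1 = m by omega]
  · rw [if_neg ht, pdLoop_not_qm t ht n n 0 0 [] (by omega)]
    rw [List.range_eq_range']
    simp

-- the word counts agree: A's word-list length = B's machine count
theorem wordcount_eq (s t : String) (hpre : s.toList.count '"' % 2 = 0) :
    process_date s t = process_date_alt s t := by
  unfold process_date process_date_alt
  by_cases hf : PySem.Str.find s "\"" = -1
  · -- no quotation mark: both sides count commas
    have hninf : ¬ ("\"".toList <:+: s.toList) := by
      rw [PySem.Str.find_eq] at hf
      exact (PySem.Chars.find_eq_neg_one_iff _ _).mp hf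
    have hisin : PySem.Str.isIn "\"" s = false := by
      rw [PySem.Str.isIn_eq]
      exact (PySem.Chars.isIn_eq_false_iff _ _).mpr hninf
    have hsp : PySem.Str.split? s ","
        = some ((PySem.Chars.splitOn.go [','] (s.toList.length + 1) s.toList [] []).map
            String.ofList) := rfl
    have hlen : ((PySem.Str.split? s ",").getD []).length = s.toList.count ',' + 1 := by
      have h1 := splitOn_go_length (s.toList.length + 1) s.toList [] [] (by omega)
      simp only [List.length_nil] at h1
      rw [hsp]
      simp only [Option.getD_some, List.length_map]
      omega
    have hcnt : PySem.Str.count s "," = s.toList.count ',' := by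
      have hc0 : PySem.Str.count s ","
          = PySem.Chars.count.go [','] s.toList.length s.toList 0 := rfl
      rw [hc0, count_go_comma s.toList.length s.toList 0 (le_refl _)]
      omega
    rw [processSearchWords, if_pos hf, hisin]
    simp only [List.length_cons, Nat.add_sub_cancel, pdLoop_closed, hlen, hcnt]
    simp
  · -- quotation mark present: A parses, B's machine counts
    have hisin : PySem.Str.isIn "\"" s = true := by
      rw [PySem.Str.isIn_eq]
      rw [PySem.Str.find_eq] at hf
      exact (PySem.Chars.isIn_iff_infix _ _).mpr (by
        by_contra hninf
        exact hf ((PySem.Chars.find_eq_neg_one_iff _ _).mpr hninf))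
    obtain ⟨wl, heq, hlen⟩ := pswLoop_spec s.toList (s.toList.length + 1) 0 [] []
      (by omega) (by omega) (by simpa using hpre)
    simp only [List.drop_zero, List.isEmpty_nil, Bool.not_true] at hlen
    rw [processSearchWords, if_neg hf, heq, hisin]
    simp only [List.nil_append, List.length_cons, Nat.add_sub_cancel, pdLoop_closed, hlen]
    simp

-- ===== VERDICT (by name: the statements are the Claim_ definitions above) =====
theorem process_date_spec : Claim_equal_process_date := by
  intro s t _ hpre
  exact wordcount_eq s t hpre
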